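-- pv_equiv track=rewrite | github.com/hojoungjang/programming-exercises | 10799-쇠막대기/solution.py | solution
-- ===== SOURCE A (Python) =====
-- def solution(ps):
--     cnt = 0
--     stack = []
--
--     for i, p in enumerate(ps):
--         if p == "(":
--             stack.append((i, p))
--         elif p == ")":
--             if not stack:
--                 continue
--
--             idx, _ = stack.pop()
--             if idx == i - 1:
--                 cnt += len(stack)
--             else:
--                 cnt += 1
--     return cnt
-- ===== SOURCE B (Python) =====
-- def solution(ps):
--     # Phase 1: match the brackets, classifying each matched pair as a
--     # laser ("()" adjacent) or a bar end, and keeping unmatched opens.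
--     stack = []
--     bars = []
--     lasers = []
--     for i, p in enumerate(ps):
--         if p == "(":
--             stack.append(i)
--         elif p == ")":
--             if not stack:
--                 continue
--             j = stack.pop()
--             if i == j + 1:
--                 lasers.append(j)
--             else:
--                 bars.append((j, i))
--     # Phase 2: flipped double counting — each bar yields 1 piece plus one
--     # per laser strictly inside it; an unmatched open is a bar extending to
--     # the end, yielding one piece per laser after it.
--     total = len(bars)
--     for a, b in bars:
--         total += sum(1 for l in lasers if a < l < b)
--     for a in stack:
--         total += sum(1 for l in lasers if l > a)
--     return total
-- ===== Notes on version B (the rewrite author's own statement) =====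
-- stated objective: alternative
-- what changed: Flips the double counting: instead of adding the current stack depth at each laser during one pass, B first matches the brackets into lasers, bars and unmatched opens, then counts one piece per bar plus one per laser strictly inside each bar (and per laser after each unmatched open).
import Mathlib
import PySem

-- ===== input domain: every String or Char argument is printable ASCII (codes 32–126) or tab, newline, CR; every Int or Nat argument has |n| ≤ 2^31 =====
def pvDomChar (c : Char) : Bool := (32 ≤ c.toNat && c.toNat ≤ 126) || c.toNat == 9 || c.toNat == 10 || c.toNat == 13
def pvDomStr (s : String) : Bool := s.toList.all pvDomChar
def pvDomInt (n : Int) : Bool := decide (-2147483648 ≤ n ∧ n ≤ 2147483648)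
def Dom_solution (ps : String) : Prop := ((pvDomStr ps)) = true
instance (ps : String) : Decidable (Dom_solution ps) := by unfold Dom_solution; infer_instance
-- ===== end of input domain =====

-- B counts by the opposite double counting: instead of adding the stack depth at each
-- laser, it first matches the brackets into lasers / bars / unmatched opens and then
-- adds, per bar, one plus the lasers inside it (per unmatched open, the lasers after it).

-- ===== PORT A =====
-- the for-loop over enumerate(ps): state is (i, cnt, stack)
def solutionGo : List Char → Int → Int → List (Int × Char) → Int
  | [], _, cnt, _ => cnt
  | p :: rest, i, cnt, stack =>
    if p = '(' then
      solutionGo rest (i + 1) cnt ((i, p) :: stack)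
    else if p = ')' then
      match stack with
      | [] => solutionGo rest (i + 1) cnt []          -- continue
      | (idx, _) :: tl =>
        if idx = i - 1 then solutionGo rest (i + 1) (cnt + (tl.length : Int)) tl
        else solutionGo rest (i + 1) (cnt + 1) tl
    else
      solutionGo rest (i + 1) cnt stack

def solution (ps : String) : Int := solutionGo ps.toList 0 0 []

-- ===== PORT B =====
-- phase 1 of Source B: the for-loop over enumerate(ps); state is (i, stack, bars, lasers),
-- stack top-first, bars and lasers appended in order as in the Python
def pass1Alt : List Char → Int → List Int → List (Int × Int) → List Int →
    (List Int × List (Int × Int) × List Int)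
  | [], _, stack, bars, lasers => (stack, bars, lasers)
  | p :: rest, i, stack, bars, lasers =>
    if p = '(' then pass1Alt rest (i + 1) (i :: stack) bars lasers
    else if p = ')' then
      match stack with
      | [] => pass1Alt rest (i + 1) [] bars lasers    -- continue
      | j :: tl =>
        if i = j + 1 then pass1Alt rest (i + 1) tl bars (lasers ++ [j])
        else pass1Alt rest (i + 1) tl (bars ++ [(j, i)]) lasers
    else pass1Alt rest (i + 1) stack bars lasers

-- phase 2 of Source B: the two counting loops over bars and over the leftover stack
def solution_alt (ps : String) : Int :=
  match pass1Alt ps.toList 0 [] [] [] with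
  | (stack, bars, lasers) =>
    let t1 : Int := (bars.length : Int)
    let t2 : Int := bars.foldl
      (fun acc ab => acc + ((lasers.filter (fun l => decide (ab.1 < l ∧ l < ab.2))).length : Int)) t1
    stack.foldl (fun acc a => acc + ((lasers.filter (fun l => decide (a < l))).length : Int)) t2

-- ===== PRECONDITION & SPEC =====
def Spec_solution (ps : String) (out : Int) : Prop := out = solution_alt ps
instance (ps : String) (out : Int) : Decidable (Spec_solution ps out) := by unfold Spec_solution; infer_instance

-- ===== CLAIM (what is proved, stated in full; the proofs are below) =====
def Claim_equal_solution : Prop := ∀ (ps : String), Dom_solution ps → Spec_solution ps (solution ps)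

-- ===== LEMMAS AND PROOFS =====

-- proof-side version of phase 1 building the bars/lasers lists by cons (easier induction)
def pass1 : List Char → Int → List Int → (List Int × List (Int × Int) × List Int)
  | [], _, stack => (stack, [], [])
  | p :: rest, i, stack =>
    if p = '(' then pass1 rest (i + 1) (i :: stack)
    else if p = ')' then
      match stack with
      | [] => pass1 rest (i + 1) []
      | j :: tl =>
        let r := pass1 rest (i + 1) tl
        if i = j + 1 then (r.1, r.2.1, j :: r.2.2)
        else (r.1, (j, i) :: r.2.1, r.2.2)
    else pass1 rest (i + 1) stack

-- phase 1 with append-accumulators equals the cons version with the accumulators appended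
theorem pass1Alt_eq (l : List Char) (i : Int) (S : List Int) (bs : List (Int × Int))
    (ls : List Int) :
    pass1Alt l i S bs ls =
      ((pass1 l i S).1, bs ++ (pass1 l i S).2.1, ls ++ (pass1 l i S).2.2) := by
  induction l generalizing i S bs ls with
  | nil => simp [pass1Alt, pass1]
  | cons p rest ih =>
    by_cases hp : p = '('
    · simp [pass1Alt, pass1, hp, ih]
    · by_cases hq : p = ')'
      · cases S with
        | nil => simp [pass1Alt, pass1, hq, ih]
        | cons j tl =>
          by_cases hj : i = j + 1 <;>
            simp [pass1Alt, pass1, hp, hq, hj, ih]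
      · simp [pass1Alt, pass1, hp, hq, ih]

-- B's total as a function of phase 1's result
def totalB : List Int → List (Int × Int) → List Int → Int
  | S, bars, lasers =>
    (bars.length : Int)
      + (bars.map (fun ab => ((lasers.filter (fun l => decide (ab.1 < l ∧ l < ab.2))).length : Int))).sum
      + (S.map (fun a => ((lasers.filter (fun l => decide (a < l))).length : Int))).sum

theorem sum_map_filter_cons (bars : List (Int × Int)) (j : Int) (L : List Int) :
    (bars.map (fun ab => (((j :: L).filter (fun l => decide (ab.1 < l ∧ l < ab.2))).length : Int))).sum
      = (bars.map (fun ab => ((L.filter (fun l => decide (ab.1 < l ∧ l < ab.2))).length : Int))).sum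
        + ((bars.filter (fun ab => decide (ab.1 < j ∧ j < ab.2))).length : Int) := by
  induction bars with
  | nil => simp
  | cons ab bs ih =>
    simp only [List.map_cons, List.sum_cons]
    rw [ih, List.filter_cons]
    by_cases h : ab.1 < j ∧ j < ab.2
    · rw [if_pos (decide_eq_true h), List.filter_cons, if_pos (decide_eq_true h)]
      simp only [List.length_cons]
      push_cast
      ring
    · rw [if_neg (by simp [h]), List.filter_cons, if_neg (by simp [h])]
      ring

theorem sum_map_filter_cons' (S : List Int) (j : Int) (L : List Int) :
    (S.map (fun a => (((j :: L).filter (fun l => decide (a < l))).length : Int))).sum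
      = (S.map (fun a => ((L.filter (fun l => decide (a < l))).length : Int))).sum
        + ((S.filter (fun a => decide (a < j))).length : Int) := by
  induction S with
  | nil => simp
  | cons a S ih =>
    simp only [List.map_cons, List.sum_cons]
    rw [ih, List.filter_cons]
    by_cases h : a < j
    · rw [if_pos (decide_eq_true h), List.filter_cons, if_pos (decide_eq_true h)]
      simp only [List.length_cons]
      push_cast
      ring
    · rw [if_neg (by simp [h]), List.filter_cons, if_neg (by simp [h])]
      ring

-- each open on the initial stack ends up (below threshold t < i) either as a bar
-- enclosing t or as a leftover open; later opens are ≥ i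
theorem pass1_split (l : List Char) (i t : Int) (S : List Int) (ht : t < i) :
    ((pass1 l i S).2.1.filter (fun ab => decide (ab.1 < t ∧ t < ab.2))).length
      + ((pass1 l i S).1.filter (fun a => decide (a < t))).length
      = (S.filter (fun a => decide (a < t))).length := by
  induction l generalizing i S with
  | nil => simp [pass1]
  | cons p rest ih =>
    by_cases hp : p = '('
    · have h := ih (i + 1) (i :: S) (by omega)
      simp only [pass1, if_pos hp] at *
      rw [h, List.filter_cons]
      have : ¬ (i < t) := by omega
      simp [this]
    · by_cases hq : p = ')'
      · cases S with
        | nil =>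
          simp only [pass1, if_neg hp, if_pos hq]
          simpa using ih (i + 1) [] (by omega)
        | cons j tl =>
          by_cases hj : i = j + 1
          · simp only [pass1, if_neg hp, if_pos hq, if_pos hj]
            have h := ih (i + 1) tl (by omega)
            rw [h, List.filter_cons]
            have : ¬ (j < t) := by omega
            simp [this]
          · simp only [pass1, if_neg hp, if_pos hq, if_neg hj]
            have h := ih (i + 1) tl (by omega)
            rw [List.filter_cons, List.filter_cons]
            by_cases hjt : j < t
            · rw [if_pos (decide_eq_true (⟨hjt, ht⟩ : j < t ∧ t < i)),
                if_pos (decide_eq_true hjt)]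
              simp only [List.length_cons]
              omega
            · rw [if_neg (by simp [hjt]), if_neg (by simp [hjt])]
              exact h
      · simp only [pass1, if_neg hp, if_neg hq]
        exact ih (i + 1) S (by omega)

-- every laser open index produced is ≥ i - 1 when the stack holds indices < i
theorem pass1_lasers_ge (l : List Char) (i : Int) (S : List Int)
    (hS : ∀ a ∈ S, a < i) : ∀ x ∈ (pass1 l i S).2.2, i - 1 ≤ x := by
  induction l generalizing i S with
  | nil => simp [pass1]
  | cons p rest ih =>
    intro x hx
    by_cases hp : p = '('
    · simp only [pass1, if_pos hp] at hx
      have := ih (i + 1) (i :: S)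
        (by intro a ha; rcases List.mem_cons.1 ha with h | h
            · omega
            · have := hS a h; omega) x hx
      omega
    · by_cases hq : p = ')'
      · cases S with
        | nil =>
          simp only [pass1, if_neg hp, if_pos hq] at hx
          have := ih (i + 1) [] (by simp) x hx; omega
        | cons j tl =>
          have htl : ∀ a ∈ tl, a < i + 1 := by
            intro a ha; have := hS a (List.mem_cons_of_mem _ ha); omega
          by_cases hj : i = j + 1
          · simp only [pass1, if_neg hp, if_pos hq, if_pos hj] at hx
            rcases List.mem_cons.1 hx with h | h
            · omega
            · have := ih (i + 1) tl htl x h; omega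
          · simp only [pass1, if_neg hp, if_pos hq, if_neg hj] at hx
            have := ih (i + 1) tl htl x hx; omega
      · simp only [pass1, if_neg hp, if_neg hq] at hx
        have := ih (i + 1) S (by intro a ha; have := hS a ha; omega) x hx
        omega

/-- The double-counting swap: A's running count (depth at each laser) equals B's
per-bar laser count, via the phase-1 decomposition. -/
theorem solutionGo_eq_totalB (l : List Char) (i cnt : Int) (S : List Int)
    (hlt : ∀ a ∈ S, a < i) (hsorted : List.Pairwise (· > ·) S) :
    solutionGo l i cnt (S.map (fun j => (j, '('))) =
      cnt + totalB (pass1 l i S).1 (pass1 l i S).2.1 (pass1 l i S).2.2 := by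
  induction l generalizing i cnt S with
  | nil => simp [solutionGo, pass1, totalB]
  | cons p rest ih =>
    by_cases hp : p = '('
    · simp only [solutionGo, pass1, hp]
      have h := ih (i + 1) cnt (i :: S)
        (by intro a ha; rcases List.mem_cons.1 ha with h | h
            · omega
            · have := hlt a h; omega)
        (List.pairwise_cons.2 ⟨fun a ha => hlt a ha, hsorted⟩)
      simpa using h
    · by_cases hq : p = ')'
      · subst hq
        cases S with
        | nil =>
          simp only [List.map_nil, solutionGo, pass1, if_neg hp]
          simpa using ih (i + 1) cnt [] (by simp) (by simp)
        | cons j tl =>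
          have hjtl : ∀ a ∈ tl, j > a := (List.pairwise_cons.1 hsorted).1
          have htl : ∀ a ∈ tl, a < i + 1 := by
            intro a ha; have := hlt a (List.mem_cons_of_mem _ ha); omega
          have htls : List.Pairwise (· > ·) tl := (List.pairwise_cons.1 hsorted).2
          have hji : j < i := hlt j (List.mem_cons_self ..)
          by_cases hj : j = i - 1
          · -- laser
            have hA : solutionGo (')' :: rest) i cnt (((j :: tl).map (fun j => (j, '(')))) =
                solutionGo rest (i + 1) (cnt + ((tl.map (fun j => (j, '('))).length : Int))
                  (tl.map (fun j => (j, '('))) := by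
              simp [solutionGo, hj]
            have hB : pass1 (')' :: rest) i (j :: tl) =
                ((pass1 rest (i + 1) tl).1, (pass1 rest (i + 1) tl).2.1,
                  j :: (pass1 rest (i + 1) tl).2.2) := by
              simp [pass1, show i = j + 1 by omega]
            rw [hA, ih (i + 1) _ tl htl htls, hB]
            have hsplit := pass1_split rest (i + 1) j tl (by omega)
            have hfil : tl.filter (fun a => decide (a < j)) = tl := by
              apply List.filter_eq_self.2
              intro a ha; exact decide_eq_true (hjtl a ha)
            rw [hfil] at hsplit
            simp only [totalB]
            rw [sum_map_filter_cons (pass1 rest (i + 1) tl).2.1 j (pass1 rest (i + 1) tl).2.2,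
              sum_map_filter_cons' (pass1 rest (i + 1) tl).1 j (pass1 rest (i + 1) tl).2.2,
              List.length_map]
            push_cast
            omega
          · -- ordinary bar end
            have hA : solutionGo (')' :: rest) i cnt (((j :: tl).map (fun j => (j, '(')))) =
                solutionGo rest (i + 1) (cnt + 1) (tl.map (fun j => (j, '('))) := by
              simp [solutionGo, hj]
            have hB : pass1 (')' :: rest) i (j :: tl) =
                ((pass1 rest (i + 1) tl).1, (j, i) :: (pass1 rest (i + 1) tl).2.1,
                  (pass1 rest (i + 1) tl).2.2) := by
              simp [pass1, show ¬ i = j + 1 by omega]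
            rw [hA, ih (i + 1) _ tl htl htls, hB]
            have hge := pass1_lasers_ge rest (i + 1) tl (by intro a ha; have := htl a ha; omega)
            have hzero : (pass1 rest (i + 1) tl).2.2.filter
                (fun l => decide (j < l ∧ l < i)) = [] := by
              apply List.filter_eq_nil_iff.2
              intro x hx
              have := hge x hx
              simp only [decide_eq_true_eq]
              omega
            simp only [totalB, List.map_cons, List.sum_cons, List.length_cons, hzero, List.length_nil]
            push_cast
            omega
      · simp only [solutionGo, pass1, if_neg hp, if_neg hq]
        exact ih (i + 1) cnt S (by intro a ha; have := hlt a ha; omega) hsorted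

-- ===== VERDICT (by name: the statement is the Claim_ definition above) =====
theorem solution_spec : Claim_equal_solution := by
  intro ps _
  unfold Spec_solution solution solution_alt
  rw [pass1Alt_eq]
  have h := solutionGo_eq_totalB ps.toList 0 0 [] (by simp) (by simp)
  simp only [List.map_nil] at h
  rw [h]
  simp only [List.nil_append, PySem.List.foldl_add, totalB]
  ring
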